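-- pv_equiv track=rewrite | github.com/Sidreyas/SOC_Agents | agents/phishing_agent/email_entity_extractor.py | _parse_email_headers
-- ===== SOURCE A (Python) =====
-- from typing import Dict, Any, List, Optional, Set
--
-- def _parse_email_headers(raw_headers: str) -> Dict[str, str]:
--     """Parse raw email headers into dictionary"""
--     headers = {}
--     current_header = ""
--     current_value = ""
--
--     lines = raw_headers.split('\n')
--     for line in lines:
--         if line.startswith(' ') or line.startswith('\t'):
--             # Continuation of previous header
--             current_value += " " + line.strip()
--         else:
--             # Save previous header
--             if current_header:
--                 headers[current_header] = current_value
--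
--             # Start new header
--             if ':' in line:
--                 parts = line.split(':', 1)
--                 current_header = parts[0].strip()
--                 current_value = parts[1].strip()
--             else:
--                 current_header = ""
--                 current_value = ""
--
--     # Save last header
--     if current_header:
--         headers[current_header] = current_value
--
--     return headers
-- ===== SOURCE B (Python) =====
-- def _parse_email_headers(raw_headers: str) -> dict:
--     """Parse raw email headers into dictionary (two-pass: group, then assemble)."""
--     lines = raw_headers.split('\n')
--     n = len(lines)
--     i = 0
--     # drop leading continuation lines (they have no header to attach to)
--     while i < n and lines[i].startswith((' ', '\t')):
--         i += 1
--     headers = {}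
--     while i < n:
--         start = lines[i]
--         i += 1
--         conts = []
--         while i < n and lines[i].startswith((' ', '\t')):
--             conts.append(lines[i].strip())
--             i += 1
--         if ':' in start:
--             key, value = start.split(':', 1)
--             key = key.strip()
--             if key:
--                 headers[key] = value.strip() + ''.join(' ' + c for c in conts)
--     return headers
-- ===== Notes on version B (the rewrite author's own statement) =====
-- stated objective: alternative
-- what changed: Replaces A's single-pass state machine (pending current_header/current_value threaded through one loop with a final flush) by a record-chunked traversal: drop leading continuation lines, then repeatedly take one start line plus its whole continuation chunk and assemble/insert that header in one step, with no pending state.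
import Mathlib
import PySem

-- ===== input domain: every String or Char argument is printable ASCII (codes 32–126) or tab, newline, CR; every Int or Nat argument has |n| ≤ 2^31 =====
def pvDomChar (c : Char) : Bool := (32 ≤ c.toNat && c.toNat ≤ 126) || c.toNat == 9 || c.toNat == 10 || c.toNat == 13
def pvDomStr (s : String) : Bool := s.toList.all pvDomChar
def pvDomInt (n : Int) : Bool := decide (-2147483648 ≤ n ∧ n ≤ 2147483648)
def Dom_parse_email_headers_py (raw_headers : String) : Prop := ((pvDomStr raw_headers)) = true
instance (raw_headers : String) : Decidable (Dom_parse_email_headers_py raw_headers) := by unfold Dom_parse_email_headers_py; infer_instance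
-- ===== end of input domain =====

-- B replaces A's single state machine (pending header/value threaded through one fold) by a two-pass
-- decomposition: drop leading continuation lines, then consume one record (start line + its continuation
-- chunk) per step; same output, alternative structure (no speed claim).


-- ===== PORT A =====
-- one loop step of A: state = (headers, current_header, current_value)
def pvAStep (st : PySem.Dict String String × String × String) (line : String) :
    PySem.Dict String String × String × String :=
  if PySem.Str.startswith line " " || PySem.Str.startswith line "\t" then
    -- continuation of previous header
    (st.1, st.2.1, st.2.2 ++ " " ++ PySem.Str.strip line)
  else
    -- save previous header
    let d := if st.2.1 ≠ "" then st.1.insert st.2.1 st.2.2 else st.1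
    -- start new header
    if PySem.Str.isIn ":" line then
      let parts := (PySem.Str.splitMax? line ":" 1).getD []
      (d, PySem.Str.strip (parts.getD 0 ""), PySem.Str.strip (parts.getD 1 ""))
    else
      (d, "", "")

def parse_email_headers_py (raw_headers : String) : List (String × String) :=
  let lines := (PySem.Str.split? raw_headers "\n").getD []
  let st := lines.foldl pvAStep (PySem.Dict.empty, "", "")
  -- save last header
  (if st.2.1 ≠ "" then st.1.insert st.2.1 st.2.2 else st.1).items

-- ===== PORT B =====
def pvIsCont (line : String) : Bool :=
  PySem.Str.startswith line " " || PySem.Str.startswith line "\t"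

-- ''.join(' ' + c for c in conts) where conts are the stripped continuation lines
def pvJoinConts (conts : List String) : String :=
  PySem.Str.join "" ((conts.map PySem.Str.strip).map (fun c => " " ++ c))

-- consume one record (start line + its continuation chunk) per step
def pvBGo (d : PySem.Dict String String) : List String → PySem.Dict String String
  | [] => d
  | start :: rest =>
    let conts := rest.takeWhile pvIsCont
    let rest' := rest.dropWhile pvIsCont
    let d' :=
      if PySem.Str.isIn ":" start then
        let parts := (PySem.Str.splitMax? start ":" 1).getD []
        let key := PySem.Str.strip (parts.getD 0 "")
        if key ≠ "" then
          d.insert key (PySem.Str.strip (parts.getD 1 "") ++ pvJoinConts conts)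
        else d
      else d
    pvBGo d' rest'
termination_by l => l.length
decreasing_by
  simpa using Nat.lt_succ_of_le (List.length_dropWhile_le pvIsCont rest)

def parse_email_headers_py_alt (raw_headers : String) : List (String × String) :=
  let lines := (PySem.Str.split? raw_headers "\n").getD []
  (pvBGo PySem.Dict.empty (lines.dropWhile pvIsCont)).items

-- ===== PRECONDITION & SPEC =====
def Spec_parse_email_headers_py (raw_headers : String) (out : List (String × String)) : Prop := out = parse_email_headers_py_alt raw_headers
instance (raw_headers : String) (out : List (String × String)) : Decidable (Spec_parse_email_headers_py raw_headers out) := by unfold Spec_parse_email_headers_py; infer_instance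

-- ===== CLAIM (what is proved, stated in full; the proofs are below) =====
def Claim_equal_parse_email_headers_py : Prop := ∀ (raw_headers : String), Dom_parse_email_headers_py raw_headers → Spec_parse_email_headers_py raw_headers (parse_email_headers_py raw_headers)

-- ===== LEMMAS AND PROOFS =====

-- flush A's pending (header, value) into the dictionary
def pvFlush (d : PySem.Dict String String) (ch cv : String) : PySem.Dict String String :=
  if ch ≠ "" then d.insert ch cv else d

lemma pvStrJoinEmpty_cons (x : String) (xs : List String) :
    PySem.Str.join "" (x :: xs) = x ++ PySem.Str.join "" xs := by
  cases xs with
  | nil => simp [PySem.Str.join, PySem.Chars.join_singleton, PySem.Chars.join_nil]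
  | cons y ys => simp [PySem.Str.join, PySem.Chars.join_cons_cons]

lemma pvJoinConts_nil : pvJoinConts [] = "" := rfl

lemma pvJoinConts_cons (l : String) (ls : List String) :
    pvJoinConts (l :: ls) = " " ++ PySem.Str.strip l ++ pvJoinConts ls := by
  simp only [pvJoinConts, List.map_cons, pvStrJoinEmpty_cons, String.append_assoc]

-- the loop invariant: A's fold from any state, flushed, equals B's record recursion after flushing
-- the pending header extended by the leading continuation chunk
lemma pvMain (lines : List String) : ∀ (d : PySem.Dict String String) (ch cv : String),
    (fun st : PySem.Dict String String × String × String => pvFlush st.1 st.2.1 st.2.2)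
      (lines.foldl pvAStep (d, ch, cv)) =
    pvBGo (pvFlush d ch (cv ++ pvJoinConts (lines.takeWhile pvIsCont)))
      (lines.dropWhile pvIsCont) := by
  induction lines with
  | nil =>
    intro d ch cv
    simp [pvJoinConts_nil, pvBGo, String.append_empty]
  | cons l ls ih =>
    intro d ch cv
    by_cases hc : pvIsCont l = true
    · have hc' : (PySem.Str.startswith l " " || PySem.Str.startswith l "\t") = true := hc
      have hstep : pvAStep (d, ch, cv) l = (d, ch, cv ++ " " ++ PySem.Str.strip l) := by
        unfold pvAStep
        rw [if_pos hc']
      rw [List.foldl_cons, hstep, ih,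
        List.takeWhile_cons_of_pos hc, List.dropWhile_cons_of_pos hc,
        pvJoinConts_cons]
      simp only [String.append_assoc]
    · have hc' : ¬ (PySem.Str.startswith l " " || PySem.Str.startswith l "\t") = true := hc
      rw [List.takeWhile_cons_of_neg hc, List.dropWhile_cons_of_neg hc,
        pvJoinConts_nil, String.append_empty]
      by_cases hcol : PySem.Str.isIn ":" l = true
      · have hstep : pvAStep (d, ch, cv) l =
            (pvFlush d ch cv,
             PySem.Str.strip (((PySem.Str.splitMax? l ":" 1).getD []).getD 0 ""),
             PySem.Str.strip (((PySem.Str.splitMax? l ":" 1).getD []).getD 1 "")) := by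
          unfold pvAStep pvFlush
          rw [if_neg hc', if_pos hcol]
        rw [List.foldl_cons, hstep, ih]
        conv_rhs => rw [pvBGo]
        rw [if_pos hcol]
        simp only [pvFlush]
      · have hstep : pvAStep (d, ch, cv) l = (pvFlush d ch cv, "", "") := by
          unfold pvAStep pvFlush
          rw [if_neg hc', if_neg hcol]
        rw [List.foldl_cons, hstep, ih]
        conv_rhs => rw [pvBGo]
        rw [if_neg hcol]
        simp [pvFlush]

-- the invariant at the ports' initial state
lemma pvTop (lines : List String) :
    (if (lines.foldl pvAStep (PySem.Dict.empty, "", "")).2.1 ≠ "" then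
        (lines.foldl pvAStep (PySem.Dict.empty, "", "")).1.insert
          (lines.foldl pvAStep (PySem.Dict.empty, "", "")).2.1
          (lines.foldl pvAStep (PySem.Dict.empty, "", "")).2.2
      else (lines.foldl pvAStep (PySem.Dict.empty, "", "")).1) =
    pvBGo PySem.Dict.empty (lines.dropWhile pvIsCont) := by
  have h := pvMain lines PySem.Dict.empty "" ""
  simp only [pvFlush] at h
  simpa using h

-- ===== VERDICT (by name: the statement is the Claim_ definition above) =====
theorem parse_email_headers_py_spec : Claim_equal_parse_email_headers_py := by
  intro raw _
  exact congrArg PySem.Dict.items (pvTop ((PySem.Str.split? raw "\n").getD []))
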